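-- pv_equiv track=rewrite | github.com/MaukWM/CrisisBench | src/crisis_bench/generator/modules/calendar.py | _build_today_summary
-- ===== SOURCE A (Python) =====
-- _SOCIAL_KEYWORDS = ("lunch", "dinner", "gym", "coffee", "drinks")
--
-- def _format_casual_time(time_24h: str) -> str:
--     """Convert '14:30' to '2:30pm', '12:00' to 'noon'."""
--     h, m = time_24h.split(":")
--     hour, minute = int(h), int(m)
--     if hour == 12 and minute == 0:
--         return "noon"
--     suffix = "am" if hour < 12 else "pm"
--     display = hour if hour <= 12 else hour - 12
--     if display == 0:
--         display = 12
--     return f"{display}:{minute:02d}{suffix}" if minute else f"{display}{suffix}"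
--
-- def _build_today_summary(events: list[tuple[str, str, str, list[str]]]) -> str:
--     """Generate a natural-language summary from the scripted events list."""
--     highlighted: set[int] = set()
--     notable_parts: list[str] = []
--
--     # Find notable social/personal events to highlight separately.
--     for i, (time_str, title, _loc, _att) in enumerate(events):
--         if any(kw in title.lower() for kw in _SOCIAL_KEYWORDS):
--             highlighted.add(i)
--             notable_parts.append(f"{title.lower()} at {_format_casual_time(time_str)}")
--
--     # Count remaining events as "meetings".
--     meeting_count = sum(1 for i, e in enumerate(events) if i not in highlighted and e[3])
--     solo_count = sum(1 for i, e in enumerate(events) if i not in highlighted and not e[3])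
--
--     parts: list[str] = []
--     if meeting_count:
--         parts.append(f"{meeting_count} meetings")
--     if solo_count:
--         parts.append(f"{solo_count} block{'s' if solo_count > 1 else ''}")
--     parts.extend(notable_parts)
--
--     return ", ".join(parts)
-- ===== SOURCE B (Python) =====
-- _SOCIAL_KEYWORDS = ("lunch", "dinner", "gym", "coffee", "drinks")
--
-- def _casual_time(t):
--     hs, ms = t.split(":")
--     hour, minute = int(hs), int(ms)
--     if hour == 12 and minute == 0:
--         return "noon"
--     suffix = "pm" if hour >= 12 else "am"
--     disp = hour - 12 if hour > 12 else (12 if hour == 0 else hour)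
--     mm = f":{minute:02d}" if minute else ""
--     return f"{disp}{mm}{suffix}"
--
-- def _build_today_summary(events):
--     meeting_count = 0
--     solo_count = 0
--     notable_parts = []
--     for time_str, title, _loc, att in events:
--         low = title.lower()
--         if any(kw in low for kw in _SOCIAL_KEYWORDS):
--             notable_parts.append(f"{low} at {_casual_time(time_str)}")
--         elif att:
--             meeting_count += 1
--         else:
--             solo_count += 1
--     parts = []
--     if meeting_count:
--         parts.append(f"{meeting_count} meetings")
--     if solo_count:
--         parts.append(f"{solo_count} block{'s' if solo_count > 1 else ''}")
--     return ", ".join(parts + notable_parts)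
-- ===== Notes on version B (the rewrite author's own statement) =====
-- stated objective: simpler
-- what changed: One classifying pass (social -> notable part, elif attendees -> meeting, else solo block) replaces A's enumerate pass building a highlighted index set plus two further full enumerate re-scans that test index membership; the index set disappears entirely.
import Mathlib
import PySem

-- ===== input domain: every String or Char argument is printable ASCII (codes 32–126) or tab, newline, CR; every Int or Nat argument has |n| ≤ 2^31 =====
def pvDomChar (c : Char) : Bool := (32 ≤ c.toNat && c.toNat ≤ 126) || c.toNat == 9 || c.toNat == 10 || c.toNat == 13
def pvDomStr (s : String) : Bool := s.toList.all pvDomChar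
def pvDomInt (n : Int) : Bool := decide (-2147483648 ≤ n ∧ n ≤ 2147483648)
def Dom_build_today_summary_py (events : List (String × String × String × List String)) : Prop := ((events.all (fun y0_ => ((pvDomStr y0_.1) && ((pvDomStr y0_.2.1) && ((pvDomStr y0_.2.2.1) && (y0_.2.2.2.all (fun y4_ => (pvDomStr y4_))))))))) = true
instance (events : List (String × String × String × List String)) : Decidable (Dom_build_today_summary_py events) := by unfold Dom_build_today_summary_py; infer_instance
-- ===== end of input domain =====

-- B replaces A's enumerate/highlighted-index-set pass plus two filtering re-scans by one
-- classifying pass that counts meetings/solo blocks and collects notable parts directly (simpler).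

-- ===== PORT A =====
def pvSocialKeywords : List String := ["lunch", "dinner", "gym", "coffee", "drinks"]

-- port of _format_casual_time; none = exactly where Python raises (non-2-way split, int() ValueError)
def formatCasualCore (hour minute : Int) : String :=
  if hour = 12 ∧ minute = 0 then "noon"
  else
    let suffix : List Char := if hour < 12 then ['a', 'm'] else ['p', 'm']
    let display : Int := if hour ≤ 12 then hour else hour - 12
    let display : Int := if display = 0 then 12 else display
    if minute ≠ 0
      then String.ofList (PySem.Int.toChars display ++ [':'] ++ PySem.Chars.zfill (PySem.Int.toChars minute) 2 ++ suffix)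
      else String.ofList (PySem.Int.toChars display ++ suffix)

def formatCasualTime? (time_24h : String) : Option String :=
  match PySem.Str.split? time_24h ":" with
  | some [h, m] =>
    match PySem.Int.ofStr? h, PySem.Int.ofStr? m with
    | some hour, some minute => some (formatCasualCore hour minute)
    | _, _ => none
  | _ => none

def build_today_summary_py (events : List (String × String × String × List String)) : String :=
  -- first loop: highlighted index set + notable_parts ((formatCasualTime? _).getD "" is unreachable under Pre_)
  let loop :=
    (PySem.List.enumerate events 0).foldl
      (fun (acc : PySem.Set Int × List String) p =>
        if pvSocialKeywords.any (fun kw => PySem.Str.isIn kw (PySem.Str.lower p.2.2.1)) then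
          (acc.1.add p.1,
           acc.2 ++ [String.ofList ((PySem.Str.lower p.2.2.1).toList ++ ' ' :: 'a' :: 't' :: ' ' :: ((formatCasualTime? p.2.1).getD "").toList)])
        else acc)
      (PySem.Set.empty, [])
  let highlighted := loop.1
  let notable_parts := loop.2
  let meeting_count := ((PySem.List.enumerate events 0).filter (fun p => !(highlighted.contains p.1) && !p.2.2.2.2.isEmpty)).length
  let solo_count := ((PySem.List.enumerate events 0).filter (fun p => !(highlighted.contains p.1) && p.2.2.2.2.isEmpty)).length
  let parts : List String := []
  let parts := if meeting_count ≠ 0 then parts ++ [String.ofList (PySem.Int.toChars meeting_count ++ " meetings".toList)] else parts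
  let parts := if solo_count ≠ 0 then parts ++ [String.ofList (PySem.Int.toChars solo_count ++ " block".toList ++ (if solo_count > 1 then ['s'] else []))] else parts
  let parts := parts ++ notable_parts
  PySem.Str.join ", " parts

-- ===== PORT B =====
-- port of Source B's _casual_time
def casualCoreB (hour minute : Int) : String :=
  if hour = 12 ∧ minute = 0 then "noon"
  else
    let suffix : List Char := if 12 ≤ hour then ['p', 'm'] else ['a', 'm']
    let disp : Int := if 12 < hour then hour - 12 else if hour = 0 then 12 else hour
    let mm : List Char := if minute ≠ 0 then ':' :: PySem.Chars.zfill (PySem.Int.toChars minute) 2 else []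
    String.ofList (PySem.Int.toChars disp ++ mm ++ suffix)

def casualTimeB? (t : String) : Option String :=
  match PySem.Str.split? t ":" with
  | some [hs, ms] =>
    match PySem.Int.ofStr? hs, PySem.Int.ofStr? ms with
    | some hour, some minute => some (casualCoreB hour minute)
    | _, _ => none
  | _ => none

def build_today_summary_py_alt (events : List (String × String × String × List String)) : String :=
  let acc :=
    events.foldl
      (fun (acc : Nat × Nat × List String) e =>
        let low := PySem.Str.lower e.2.1
        if pvSocialKeywords.any (fun kw => PySem.Str.isIn kw low) then
          (acc.1, acc.2.1, acc.2.2 ++ [String.ofList (low.toList ++ ' ' :: 'a' :: 't' :: ' ' :: ((casualTimeB? e.1).getD "").toList)])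
        else if !e.2.2.2.isEmpty then (acc.1 + 1, acc.2.1, acc.2.2)
        else (acc.1, acc.2.1 + 1, acc.2.2))
      (0, 0, [])
  let parts : List String :=
    (if acc.1 ≠ 0 then [String.ofList (PySem.Int.toChars acc.1 ++ " meetings".toList)] else []) ++
    (if acc.2.1 ≠ 0 then [String.ofList (PySem.Int.toChars acc.2.1 ++ " block".toList ++ (if acc.2.1 > 1 then ['s'] else []))] else [])
  PySem.Str.join ", " (parts ++ acc.2.2)

-- ===== PRECONDITION & SPEC =====
-- a time string on which int()/unpacking in _format_casual_time succeeds: exactly two ':'-fields, both int-parseable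
def pvTimeOk (t : String) : Bool :=
  match PySem.Str.split? t ":" with
  | some [h, m] => (PySem.Int.ofStr? h).isSome && (PySem.Int.ofStr? m).isSome
  | _ => false

-- Pre_ excludes exactly the inputs where A raises (ValueError in _format_casual_time on a
-- social-titled event's malformed time string); B raises there identically.
def Pre_build_today_summary_py (events : List (String × String × String × List String)) : Prop :=
  ∀ e ∈ events, (pvSocialKeywords.any (fun kw => PySem.Str.isIn kw (PySem.Str.lower e.2.1))) = true → pvTimeOk e.1 = true
instance (events : List (String × String × String × List String)) : Decidable (Pre_build_today_summary_py events) := by unfold Pre_build_today_summary_py; infer_instance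

def pvWitness_build_today_summary_py : (List (String × String × String × List String)) :=
  [("12:00", "Lunch with Bob", "cafe", []), ("14:30", "review", "room", ["a", "b"])]

def Spec_build_today_summary_py (events : List (String × String × String × List String)) (out : String) : Prop := out = build_today_summary_py_alt events
instance (events : List (String × String × String × List String)) (out : String) : Decidable (Spec_build_today_summary_py events out) := by unfold Spec_build_today_summary_py; infer_instance

-- ===== CLAIM (what is proved, stated in full; the proofs are below) =====
def Claim_equal_build_today_summary_py : Prop := ∀ (events : List (String × String × String × List String)), Dom_build_today_summary_py events → Pre_build_today_summary_py events → Spec_build_today_summary_py events (build_today_summary_py events)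

-- ===== LEMMAS AND PROOFS =====

-- proof-side abbreviations (used only below)
def pvSoc (e : String × String × String × List String) : Bool :=
  pvSocialKeywords.any (fun kw => PySem.Str.isIn kw (PySem.Str.lower e.2.1))

def pvPart (e : String × String × String × List String) : String :=
  String.ofList ((PySem.Str.lower e.2.1).toList ++ ' ' :: 'a' :: 't' :: ' ' :: ((formatCasualTime? e.1).getD "").toList)

def pvMeet (e : String × String × String × List String) : Bool := !pvSoc e && !e.2.2.2.isEmpty

def pvSolo (e : String × String × String × List String) : Bool := !pvSoc e && e.2.2.2.isEmpty

-- the common normal form both ports are reduced to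
def pvNormal (events : List (String × String × String × List String)) : String :=
  let m := (events.filter pvMeet).length
  let s := (events.filter pvSolo).length
  let parts : List String :=
    (if m ≠ 0 then [String.ofList (PySem.Int.toChars m ++ " meetings".toList)] else []) ++
    (if s ≠ 0 then [String.ofList (PySem.Int.toChars s ++ " block".toList ++ (if s > 1 then ['s'] else []))] else [])
  PySem.Str.join ", " (parts ++ (events.filter pvSoc).map pvPart)

theorem casualCoreB_eq (hour minute : Int) : casualCoreB hour minute = formatCasualCore hour minute := by
  unfold casualCoreB formatCasualCore
  have hdisp : (if 12 < hour then hour - 12 else if hour = 0 then 12 else hour)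
      = (if (if hour ≤ 12 then hour else hour - 12) = 0 then 12
         else (if hour ≤ 12 then hour else hour - 12)) := by
    split_ifs <;> omega
  have hsuf : (if (12:Int) ≤ hour then ['p', 'm'] else ['a', 'm'])
      = (if hour < 12 then ['a', 'm'] else ['p', 'm']) := by
    split_ifs <;> first | rfl | omega
  simp only [hdisp, hsuf]
  by_cases h12 : hour = 12 ∧ minute = 0 <;> by_cases hm : minute = 0 <;> simp [h12, hm]

theorem casualTimeB?_eq (t : String) : casualTimeB? t = formatCasualTime? t := by
  unfold casualTimeB? formatCasualTime?
  cases PySem.Str.split? t ":" with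
  | none => rfl
  | some l =>
    cases l with
    | nil => rfl
    | cons h tl =>
      cases tl with
      | nil => rfl
      | cons m tl2 =>
        cases tl2 with
        | cons c r => rfl
        | nil =>
          dsimp only
          cases PySem.Int.ofStr? h with
          | none => rfl
          | some hour =>
            cases PySem.Int.ofStr? m with
            | none => rfl
            | some minute => dsimp only; rw [casualCoreB_eq]

theorem pvPartB_eq (e : String × String × String × List String) :
    String.ofList ((PySem.Str.lower e.2.1).toList ++ ' ' :: 'a' :: 't' :: ' ' :: ((casualTimeB? e.1).getD "").toList) = pvPart e := by
  rw [casualTimeB?_eq]; rfl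

theorem pvA_fold (l : List (Int × (String × String × String × List String)))
    (s : PySem.Set Int) (n : List String) :
    l.foldl
      (fun (acc : PySem.Set Int × List String) p =>
        if pvSocialKeywords.any (fun kw => PySem.Str.isIn kw (PySem.Str.lower p.2.2.1)) then
          (acc.1.add p.1,
           acc.2 ++ [String.ofList ((PySem.Str.lower p.2.2.1).toList ++ ' ' :: 'a' :: 't' :: ' ' :: ((formatCasualTime? p.2.1).getD "").toList)])
        else acc)
      (s, n)
    = (l.foldl (fun (s : PySem.Set Int) p => if pvSoc p.2 then s.add p.1 else s) s,
       n ++ (l.filter (fun p => pvSoc p.2)).map (fun p => pvPart p.2)) := by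
  induction l generalizing s n with
  | nil => simp
  | cons p l ih =>
    simp only [List.foldl_cons, List.filter_cons]
    by_cases h : pvSoc p.2
    · have h' : (pvSocialKeywords.any (fun kw => PySem.Str.isIn kw (PySem.Str.lower p.2.2.1))) = true := h
      simp only [h, h', reduceIte]
      rw [ih]
      simp [pvPart]
    · have h' : (pvSocialKeywords.any (fun kw => PySem.Str.isIn kw (PySem.Str.lower p.2.2.1))) = false := by
        simpa [pvSoc] using h
      have hf : pvSoc p.2 = false := by simpa using h
      simp only [hf, h', Bool.false_eq_true, reduceIte]
      rw [ih]

theorem pvMem_A_set (l : List (Int × (String × String × String × List String)))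
    (s : PySem.Set Int) (x : Int) :
    x ∈ l.foldl (fun (s : PySem.Set Int) p => if pvSoc p.2 then s.add p.1 else s) s
      ↔ x ∈ s ∨ ∃ p ∈ l, pvSoc p.2 = true ∧ p.1 = x := by
  induction l generalizing s with
  | nil => simp
  | cons p l ih =>
    simp only [List.foldl_cons, List.mem_cons]
    by_cases h : pvSoc p.2
    · simp only [h, reduceIte, ih, PySem.Set.mem_add]
      constructor
      · rintro ((hx | hx) | ⟨q, hq, hq2, hq3⟩)
        · exact Or.inl hx
        · exact Or.inr ⟨p, Or.inl rfl, h, hx.symm⟩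
        · exact Or.inr ⟨q, Or.inr hq, hq2, hq3⟩
      · rintro (hx | ⟨q, (rfl | hq), hq2, hq3⟩)
        · exact Or.inl (Or.inl hx)
        · exact Or.inl (Or.inr hq3.symm)
        · exact Or.inr ⟨q, hq, hq2, hq3⟩
    · have hf : pvSoc p.2 = false := by simpa using h
      simp only [hf, Bool.false_eq_true, reduceIte, ih]
      constructor
      · rintro (hx | ⟨q, hq, hq2, hq3⟩)
        · exact Or.inl hx
        · exact Or.inr ⟨q, Or.inr hq, hq2, hq3⟩
      · rintro (hx | ⟨q, (rfl | hq), hq2, hq3⟩)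
        · exact Or.inl hx
        · rw [hf] at hq2; cases hq2
        · exact Or.inr ⟨q, hq, hq2, hq3⟩

theorem pvContains_A_set (events : List (String × String × String × List String))
    (p : Int × (String × String × String × List String))
    (hp : p ∈ PySem.List.enumerate events 0) :
    ((PySem.List.enumerate events 0).foldl
        (fun (s : PySem.Set Int) p => if pvSoc p.2 then s.add p.1 else s)
        PySem.Set.empty).contains p.1 = pvSoc p.2 := by
  cases hb : pvSoc p.2 with
  | true =>
    rw [PySem.Set.contains_iff]
    exact (pvMem_A_set _ _ _).mpr (Or.inr ⟨p, hp, hb, rfl⟩)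
  | false =>
    rw [Bool.eq_false_iff]
    intro hc
    rw [PySem.Set.contains_iff] at hc
    rcases (pvMem_A_set _ _ _).mp hc with hmem | ⟨q, hq, hq2, hq3⟩
    · simp [PySem.Set.empty] at hmem
    · rcases (PySem.List.mem_enumerate_iff _ _ _).mp hp with ⟨k, hk, rfl⟩
      rcases (PySem.List.mem_enumerate_iff _ _ _).mp hq with ⟨k', hk', rfl⟩
      have : k' = k := by
        have := hq3
        simp only at this
        omega
      subst this
      simp only at hq2
      rw [hq2] at hb
      exact Bool.true_eq_false ▸ hb

theorem pvEnum_filter_len {α : Type} (P : α → Bool) (xs : List α) (s : Int) :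
    ((PySem.List.enumerate xs s).filter (fun p => P p.2)).length = (xs.filter P).length := by
  induction xs generalizing s with
  | nil => simp [PySem.List.enumerate]
  | cons x xs ih =>
    rw [PySem.List.enumerate_cons]
    simp only [List.filter_cons]
    cases hP : P x <;> simp [ih]

theorem pvEnum_filter_map {α β : Type} (P : α → Bool) (F : α → β) (xs : List α) (s : Int) :
    ((PySem.List.enumerate xs s).filter (fun p => P p.2)).map (fun p => F p.2)
      = (xs.filter P).map F := by
  induction xs generalizing s with
  | nil => simp [PySem.List.enumerate]
  | cons x xs ih =>
    rw [PySem.List.enumerate_cons]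
    simp only [List.filter_cons]
    cases hP : P x <;> simp [ih]

theorem pvB_fold (l : List (String × String × String × List String))
    (m s : Nat) (nb : List String) :
    l.foldl
      (fun (acc : Nat × Nat × List String) e =>
        let low := PySem.Str.lower e.2.1
        if pvSocialKeywords.any (fun kw => PySem.Str.isIn kw low) then
          (acc.1, acc.2.1, acc.2.2 ++ [String.ofList (low.toList ++ ' ' :: 'a' :: 't' :: ' ' :: ((casualTimeB? e.1).getD "").toList)])
        else if !e.2.2.2.isEmpty then (acc.1 + 1, acc.2.1, acc.2.2)
        else (acc.1, acc.2.1 + 1, acc.2.2))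
      (m, s, nb)
    = (m + (l.filter pvMeet).length, s + (l.filter pvSolo).length,
       nb ++ (l.filter pvSoc).map pvPart) := by
  induction l generalizing m s nb with
  | nil => simp
  | cons e l ih =>
    simp only [List.foldl_cons, List.filter_cons]
    by_cases h : pvSoc e
    · have h' : (pvSocialKeywords.any (fun kw => PySem.Str.isIn kw (PySem.Str.lower e.2.1))) = true := h
      have hm : pvMeet e = false := by simp [pvMeet, h]
      have hs : pvSolo e = false := by simp [pvSolo, h]
      simp only [h, h', hm, hs, Bool.false_eq_true, reduceIte]
      rw [ih, pvPartB_eq]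
      simp
    · have h' : (pvSocialKeywords.any (fun kw => PySem.Str.isIn kw (PySem.Str.lower e.2.1))) = false := by
        simpa [pvSoc] using h
      have hf : pvSoc e = false := by simpa using h
      by_cases ha : e.2.2.2.isEmpty
      · have hm : pvMeet e = false := by simp [pvMeet, ha]
        have hs : pvSolo e = true := by simp [pvSolo, hf, ha]
        simp only [hf, h', ha, hm, hs, Bool.false_eq_true, Bool.not_true, reduceIte]
        rw [ih]
        simp only [List.length_cons]
        rw [show s + 1 + (List.filter pvSolo l).length = s + ((List.filter pvSolo l).length + 1) from by omega]
      · have hm : pvMeet e = true := by simp [pvMeet, hf, ha]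
        have hs : pvSolo e = false := by simp [pvSolo, ha]
        have ha' : e.2.2.2.isEmpty = false := by simpa using ha
        simp only [hf, h', ha', hm, hs, Bool.false_eq_true, Bool.not_false, reduceIte]
        rw [ih]
        simp only [List.length_cons]
        rw [show m + 1 + (List.filter pvMeet l).length = m + ((List.filter pvMeet l).length + 1) from by omega]

theorem pvA_eq (events : List (String × String × String × List String)) :
    build_today_summary_py events = pvNormal events := by
  unfold build_today_summary_py pvNormal
  rw [pvA_fold]
  have hmc : ((PySem.List.enumerate events 0).filter
      (fun p => !(((PySem.List.enumerate events 0).foldl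
          (fun (s : PySem.Set Int) p => if pvSoc p.2 then s.add p.1 else s)
          PySem.Set.empty).contains p.1) && !p.2.2.2.2.isEmpty)).length
      = (events.filter pvMeet).length := by
    rw [List.filter_congr (fun p hp => by
      rw [pvContains_A_set events p hp]
      try rfl)]
    try exact pvEnum_filter_len pvMeet events 0
  have hsc : ((PySem.List.enumerate events 0).filter
      (fun p => !(((PySem.List.enumerate events 0).foldl
          (fun (s : PySem.Set Int) p => if pvSoc p.2 then s.add p.1 else s)
          PySem.Set.empty).contains p.1) && p.2.2.2.2.isEmpty)).length
      = (events.filter pvSolo).length := by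
    rw [List.filter_congr (fun p hp => by
      rw [pvContains_A_set events p hp]
      try rfl)]
    try exact pvEnum_filter_len pvSolo events 0
  simp only [hmc, hsc, pvEnum_filter_map, List.nil_append]
  by_cases hm : (events.filter pvMeet).length = 0 <;>
    by_cases hs : (events.filter pvSolo).length = 0 <;>
      simp [hm, hs]

theorem pvB_eq (events : List (String × String × String × List String)) :
    build_today_summary_py_alt events = pvNormal events := by
  unfold build_today_summary_py_alt pvNormal
  rw [pvB_fold]
  simp only [Nat.zero_add, List.nil_append]

-- ===== VERDICT (by name: the statement is the Claim_ definition above) =====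
theorem build_today_summary_py_spec : Claim_equal_build_today_summary_py := by
  intro events _ _
  unfold Spec_build_today_summary_py
  rw [pvA_eq, pvB_eq]
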